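-- pv_equiv track=rewrite | github.com/1ny931228/TIL | Algo/SWEA/완전검색_그리디_02/1244. 최대 상금/1244. 최대 상금(2).py | shift_nums
-- ===== SOURCE A (Python) =====
-- def shift_nums(nums, i, exchange):
--     if i == exchange:
--         return nums
--     else:
--         MAX = 0
--         for j in range(len(nums)):
--             if MAX == nums[j]:
--                 index = j
--             elif MAX < nums[j] and nums[0] != nums[j]:
--                 MAX = nums[j]
--                 index = j
--
--         if 0 <= index < len(nums):
--             nums.insert(index, 0)
--             pop_num = nums.pop(0)
--             nums.insert(0, MAX)
--             nums[index] = pop_num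
--             nums.pop(index + 1)
--             i += 1
--             return shift_nums(nums, i, exchange)
-- ===== SOURCE B (Python) =====
-- def shift_nums(nums, i, exchange):
--     # Each exchange: the scan-and-shuffle of A amounts to swapping the front
--     # element with the last occurrence of the largest positive value that
--     # differs from the current front (0 if there is none).
--     while i < exchange:
--         head = nums[0]
--         M = max((v for v in nums if v > 0 and v != head), default=0)
--         index = len(nums) - 1 - nums[::-1].index(M)
--         nums[0], nums[index] = M, head
--         i += 1
--     return nums
-- ===== Notes on version B (the rewrite author's own statement) =====
-- stated objective: simpler
-- what changed: B replaces A's recursion with a loop and replaces A's stateful scan plus five insert/pop/assign list surgeries per exchange by max()+last-index and one direct swap of the front element with the chosen position.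
import Mathlib
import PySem

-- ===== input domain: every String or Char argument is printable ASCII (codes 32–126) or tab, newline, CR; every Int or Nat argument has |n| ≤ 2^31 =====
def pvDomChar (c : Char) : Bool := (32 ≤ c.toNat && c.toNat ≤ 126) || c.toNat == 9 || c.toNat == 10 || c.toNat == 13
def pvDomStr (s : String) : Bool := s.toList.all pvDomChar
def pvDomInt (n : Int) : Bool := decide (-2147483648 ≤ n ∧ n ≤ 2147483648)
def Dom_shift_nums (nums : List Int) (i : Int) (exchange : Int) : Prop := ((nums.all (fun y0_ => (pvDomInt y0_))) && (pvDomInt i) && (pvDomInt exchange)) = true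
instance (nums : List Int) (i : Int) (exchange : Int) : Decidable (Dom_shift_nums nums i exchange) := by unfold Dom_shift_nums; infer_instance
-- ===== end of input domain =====

-- B (simpler): replaces A's recursion by a loop and A's stateful scan plus five
-- insert/pop/assign list surgeries per exchange by max()+last-index and one direct
-- swap.  Both A and B mutate the Python list argument in place the same way; the
-- equivalence proved here is about the returned value.

-- ===== PORT A =====
-- `MAX = 0; for j in range(len(nums)): ...` ; second component = `index`
-- (none = `index` never assigned, Python raises UnboundLocalError: outside Pre_)
def shiftA_scan (nums : List Int) : Int × Option Int :=
  (PySem.List.pyRange 0 (nums.length) 1).foldl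
    (fun st j =>
      let nj := PySem.List.pyGetD nums j 0          -- nums[j]; j in range, exact
      if st.1 = nj then (st.1, some j)
      else if st.1 < nj ∧ PySem.List.pyGetD nums 0 0 ≠ nj then (nj, some j)
      else st)
    ((0 : Int), (none : Option Int))

-- the five-statement shuffle executed under `if 0 <= index < len(nums):`
def shiftA_step (nums : List Int) (MAX index : Int) : List Int :=
  let a1 := PySem.List.insert nums index 0          -- nums.insert(index, 0)
  match PySem.List.pop? a1 0 with                   -- pop_num = nums.pop(0)
  | none => a1                                      -- unreachable (a1 ≠ [])
  | some (pop_num, a2) =>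
    let a3 := PySem.List.insert a2 0 MAX            -- nums.insert(0, MAX)
    let a4 := PySem.List.pySetD a3 index pop_num    -- nums[index] = pop_num (index in range here)
    match PySem.List.pop? a4 (index + 1) with       -- nums.pop(index + 1)
    | none => a4                                    -- unreachable
    | some r => r.2

-- fuel = number of remaining exchanges; it runs out only when i > exchange,
-- where the Python recursion never terminates (outside Pre_)
def shiftA : Nat → List Int → Int → Int → List Int
  | 0, nums, _, _ => nums
  | fuel + 1, nums, i, exchange =>
    if i = exchange then nums
    else
      match shiftA_scan nums with
      | (MAX, some index) =>
        if 0 ≤ index ∧ index < (nums.length : Int) then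
          shiftA fuel (shiftA_step nums MAX index) (i + 1) exchange
        else nums                                   -- Python: implicit `return None`; unreachable
      | (_, none) => nums                           -- UnboundLocalError: outside Pre_

def shift_nums (nums : List Int) (i : Int) (exchange : Int) : List Int :=
  shiftA (exchange - i).toNat nums i exchange

-- ===== PORT B =====
def shift_nums_alt (nums : List Int) (i : Int) (exchange : Int) : List Int :=
  if i < exchange then
    let head := nums.headI                          -- nums[0]; nums ≠ [] inside Pre_
    let M := PySem.List.maxD
      (nums.filter (fun v => decide (0 < v ∧ v ≠ head))) (fun v => v) 0
                                                    -- max((v for v in nums if ...), default=0)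
    let index := nums.length - 1 - (PySem.List.index? nums.reverse M).getD 0
                                                    -- len(nums)-1-nums[::-1].index(M);
                                                    -- .getD 0: ValueError only outside Pre_
    shift_nums_alt ((nums.set 0 M).set index head) (i + 1) exchange
  else nums
termination_by (exchange - i).toNat
decreasing_by omega

-- ===== PRECONDITION & SPEC =====
-- Pre_ excludes exactly the inputs where the Python A raises: i > exchange
-- (unbounded recursion, RecursionError) and the states whose max-scan never
-- assigns `index` (UnboundLocalError) at some exchange; A returns on every
-- input satisfying Pre_.
def Pre_shift_nums (nums : List Int) (i : Int) (exchange : Int) : Prop :=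
  i = exchange ∨ (i < exchange ∧
    ((0 : Int) ∈ nums ∨
     (∃ a ∈ nums, ∃ b ∈ nums, 0 < a ∧ 0 < b ∧ a ≠ b) ∨
     ((∃ p ∈ nums, 0 < p ∧ p ≠ nums.headI) ∧ exchange = i + 1)))
instance (nums : List Int) (i : Int) (exchange : Int) : Decidable (Pre_shift_nums nums i exchange) := by
  unfold Pre_shift_nums; infer_instance

def pvWitness_shift_nums : List Int × Int × Int := ([3, 1, 2], 0, 2)

def Spec_shift_nums (nums : List Int) (i : Int) (exchange : Int) (out : List Int) : Prop := out = shift_nums_alt nums i exchange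
instance (nums : List Int) (i : Int) (exchange : Int) (out : List Int) : Decidable (Spec_shift_nums nums i exchange out) := by unfold Spec_shift_nums; infer_instance

-- ===== CLAIM (what is proved, stated in full; the proofs are below) =====
def Claim_equal_shift_nums : Prop := ∀ (nums : List Int) (i : Int) (exchange : Int), Dom_shift_nums nums i exchange → Pre_shift_nums nums i exchange → Spec_shift_nums nums i exchange (shift_nums nums i exchange)

-- ===== LEMMAS AND PROOFS =====

-- the value A's scan puts in MAX and B's max() computes
def mval (nums : List Int) : Int :=
  (nums.filter (fun v => decide (0 < v ∧ v ≠ nums.headI))).foldl max 0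

-- MAX after scanning the first n elements
def mpref (nums : List Int) (n : Nat) : Int :=
  ((nums.take n).filter (fun v => decide (0 < v ∧ v ≠ nums.headI))).foldl max 0

-- the scan assigns `index` this round
def Cond (nums : List Int) : Prop :=
  (0 : Int) ∈ nums ∨ ∃ p ∈ nums, 0 < p ∧ p ≠ nums.headI

-- membership-invariant condition under which every later scan also assigns `index`
def Good (nums : List Int) : Prop :=
  (0 : Int) ∈ nums ∨ ∃ a ∈ nums, ∃ b ∈ nums, 0 < a ∧ 0 < b ∧ a ≠ b

lemma pyGetD_zero_headI (nums : List Int) : PySem.List.pyGetD nums 0 0 = nums.headI := by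
  cases nums <;> simp [pysem]

lemma maxD_eq_mval (nums : List Int) :
    PySem.List.maxD (nums.filter (fun v => decide (0 < v ∧ v ≠ nums.headI))) (fun v => v) 0
      = mval nums := by
  unfold mval
  cases h : nums.filter (fun v => decide (0 < v ∧ v ≠ nums.headI)) with
  | nil => simp [PySem.List.maxD, PySem.List.max?]
  | cons x t =>
    have hx : x ∈ nums.filter (fun v => decide (0 < v ∧ v ≠ nums.headI)) := by
      rw [h]; exact List.mem_cons_self ..
    have hx' : (0 : Int) ≤ x := by
      have := List.of_mem_filter hx
      simp only [decide_eq_true_eq] at this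
      omega
    simp [PySem.List.maxD, PySem.List.max?_id_cons, List.foldl_cons, max_eq_right hx']

lemma mval_nonneg (nums : List Int) : 0 ≤ mval nums := by
  exact (PySem.List.le_foldl_max _ 0).1

lemma mval_pos_mem (nums : List Int) (h : 0 < mval nums) :
    mval nums ∈ nums ∧ mval nums ≠ nums.headI := by
  rcases PySem.List.foldl_max_mem
      (nums.filter (fun v => decide (0 < v ∧ v ≠ nums.headI))) 0 with h0 | hmem
  · rw [mval] at h; omega
  · have := List.mem_filter.mp hmem
    simp only [decide_eq_true_eq] at this
    exact ⟨this.1, this.2.2⟩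

lemma cond_mem (nums : List Int) (hc : Cond nums) : mval nums ∈ nums := by
  by_cases hp : 0 < mval nums
  · exact (mval_pos_mem nums hp).1
  · have h0 : mval nums = 0 := by have := mval_nonneg nums; omega
    rcases hc with hz | ⟨p, hpmem, hppos, hpne⟩
    · rw [h0]; exact hz
    · exfalso
      have hpf : p ∈ nums.filter (fun v => decide (0 < v ∧ v ≠ nums.headI)) :=
        List.mem_filter.mpr ⟨hpmem, by simp [hppos, hpne]⟩
      have := (PySem.List.le_foldl_max
        (nums.filter (fun v => decide (0 < v ∧ v ≠ nums.headI))) 0).2 p hpf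
      rw [mval] at h0
      omega

lemma good_cond (nums : List Int) (hg : Good nums) : Cond nums := by
  rcases hg with h0 | ⟨a, ha, b, hb, hpa, hpb, hab⟩
  · exact Or.inl h0
  · by_cases hah : a = nums.headI
    · exact Or.inr ⟨b, hb, hpb, fun h => hab (by rw [hah, ← h])⟩
    · exact Or.inr ⟨a, ha, hpa, hah⟩

lemma scan_pref (nums : List Int) (n : Nat) (hn : n ≤ nums.length) :
    (PySem.List.pyRange 0 n 1).foldl
      (fun st j =>
        let nj := PySem.List.pyGetD nums j 0
        if st.1 = nj then (st.1, some j)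
        else if st.1 < nj ∧ PySem.List.pyGetD nums 0 0 ≠ nj then (nj, some j)
        else st)
      ((0 : Int), (none : Option Int))
    = (mpref nums n,
       (PySem.List.index? (nums.take n).reverse (mpref nums n)).map
         (fun r => ((n - 1 - r : Nat) : Int))) := by
  induction n with
  | zero => simp [mpref]
  | succ n ih =>
    have hlt : n < nums.length := by omega
    have hcast : ((n + 1 : Nat) : Int) = (n : Int) + 1 := by push_cast; ring
    rw [hcast, PySem.List.pyRange_one_succ_right (by positivity), List.foldl_append,
      ih (by omega)]
    simp only [List.foldl_cons, List.foldl_nil]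
    have hnj : PySem.List.pyGetD nums ((n : Nat) : Int) 0 = nums[n] := by
      simp [PySem.List.pyGetD_natCast, List.getD_eq_getElem?_getD, hlt]
    have htake : nums.take (n + 1) = nums.take n ++ [nums[n]] := by
      rw [List.take_succ]; simp [List.getElem?_eq_getElem hlt]
    have hmzero : (0 : Int) ≤ mpref nums n := (PySem.List.le_foldl_max _ 0).1
    have hm1 : ∀ h : (0 < nums[n] ∧ nums[n] ≠ nums.headI),
        mpref nums (n + 1) = max (mpref nums n) nums[n] := by
      intro h
      unfold mpref
      rw [htake, List.filter_append, List.foldl_append]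
      simp [h.1, h.2]
    have hm2 : ∀ _h : ¬ (0 < nums[n] ∧ nums[n] ≠ nums.headI),
        mpref nums (n + 1) = mpref nums n := by
      intro h
      unfold mpref
      rw [htake, List.filter_append, List.foldl_append]
      simp only [List.filter_cons, List.filter_nil]
      rw [if_neg (by simpa using h)]
      rfl
    have hrev : (nums.take (n + 1)).reverse = nums[n] :: (nums.take n).reverse := by
      rw [htake]; simp
    simp only [pyGetD_zero_headI, hnj]
    by_cases h1 : mpref nums n = nums[n]
    · rw [if_pos h1]
      have hmp : mpref nums (n + 1) = mpref nums n := by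
        by_cases hp : 0 < nums[n] ∧ nums[n] ≠ nums.headI
        · rw [hm1 hp, ← h1, max_self]
        · exact hm2 hp
      rw [hmp, hrev, h1, PySem.List.index?_cons_self]
      simp
    · rw [if_neg h1]
      by_cases h2 : mpref nums n < nums[n] ∧ nums.headI ≠ nums[n]
      · rw [if_pos h2]
        have hp : 0 < nums[n] ∧ nums[n] ≠ nums.headI := ⟨by omega, fun h => h2.2 h.symm⟩
        have hmp : mpref nums (n + 1) = nums[n] := by
          rw [hm1 hp]; exact max_eq_right (le_of_lt h2.1)
        rw [hmp, hrev, PySem.List.index?_cons_self]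
        simp
      · rw [if_neg h2]
        have hmp : mpref nums (n + 1) = mpref nums n := by
          by_cases hp : 0 < nums[n] ∧ nums[n] ≠ nums.headI
          · have hle : nums[n] < mpref nums n := by
              rcases not_and_or.mp h2 with hx | hx
              · omega
              · exact absurd (Ne.symm hp.2) (by simpa using hx)
            rw [hm1 hp, max_eq_left (le_of_lt hle)]
          · exact hm2 hp
        rw [hmp, hrev, PySem.List.index?_cons_of_ne _ (Ne.symm h1), Option.map_map]
        refine Prod.ext rfl ?_
        cases PySem.List.index? (List.take n nums).reverse (mpref nums n) with
        | none => rfl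
        | some r =>
          simp only [Option.map_some, Function.comp_apply, Option.some.injEq]
          omega

lemma scan_eq (nums : List Int) :
    shiftA_scan nums
    = (mval nums,
       (PySem.List.index? nums.reverse (mval nums)).map
         (fun r => ((nums.length - 1 - r : Nat) : Int))) := by
  unfold shiftA_scan
  rw [scan_pref nums nums.length le_rfl]
  simp [mpref, mval, List.take_length]

lemma set_len_append (l t : List Int) (a v : Int) :
    (l ++ a :: t).set l.length v = l ++ v :: t := by
  simp

lemma eraseIdx_len_append (l t : List Int) (a : Int) :
    (l ++ a :: t).eraseIdx l.length = l ++ t := by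
  induction l with
  | nil => simp
  | cons x xs ih => simp [ih]

-- what one exchange does: A's shuffle = B's swap, and it preserves membership
lemma step_full (nums : List Int) (M : Int) (r : Nat)
    (hM0 : 0 ≤ M) (hM : 0 < M → M ≠ nums.headI)
    (hr : PySem.List.index? nums.reverse M = some r) :
    shiftA_step nums M ((nums.length - 1 - r : Nat) : Int)
      = (nums.set 0 M).set (nums.length - 1 - r) nums.headI
    ∧ (∀ x, x ∈ (nums.set 0 M).set (nums.length - 1 - r) nums.headI ↔ x ∈ nums)
    ∧ nums.length - 1 - r < nums.length := by
  obtain ⟨pre, suf, hrev, hlen, -⟩ := (PySem.List.index?_eq_some_iff nums.reverse M r).mp hr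
  have hnums : nums = suf.reverse ++ M :: pre.reverse := by
    have h2 := congrArg List.reverse hrev
    rw [List.reverse_reverse] at h2
    rw [h2]
    simp
  have hklen : nums.length = suf.reverse.length + 1 + pre.reverse.length := by
    rw [hnums]
    simp only [List.length_append, List.length_cons, List.length_reverse]
    omega
  have hrlen : pre.reverse.length = r := by simp [hlen]
  have hk : nums.length - 1 - r = suf.reverse.length := by omega
  rw [hk]
  generalize hP : suf.reverse = P at hnums
  generalize hS : pre.reverse = S at hnums
  subst hnums
  refine ⟨?_, ?_, by simp only [List.length_append, List.length_cons]; omega⟩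
  · -- A's shuffle = B's swap
    cases P with
    | nil =>
      have hM0' : M = 0 := by
        by_cases hp : 0 < M
        · exact absurd rfl (hM hp)
        · omega
      subst hM0'
      show shiftA_step (0 :: S) 0 ((0 : Nat) : Int) = _
      rw [shiftA_step]
      rw [show (((0 : Nat) : Int)) = (0 : Int) by norm_num, PySem.List.insert_zero,
        PySem.List.pop?_zero_cons]
      simp only [PySem.List.insert_zero]
      rw [show (PySem.List.pySetD (0 :: 0 :: S) 0 0) = 0 :: 0 :: S from by
        rw [show ((0 : Int)) = ((0 : Nat) : Int) from by norm_num,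
          PySem.List.pySetD_natCast, List.set_cons_zero]]
      rw [show ((0 : Int) + 1) = ((1 : Nat) : Int) from by norm_num,
        PySem.List.pop?_natCast _ 1 (by simp)]
      simp [List.eraseIdx]
    | cons f P' =>
      have hlenP : ((f :: P') ++ M :: S).length = P'.length + 2 + S.length := by
        simp; omega
      rw [shiftA_step]
      rw [PySem.List.insert_natCast _ (f :: P').length 0 (by simp),
        List.take_left' rfl, List.drop_left' rfl]
      show (match PySem.List.pop? (f :: (P' ++ 0 :: M :: S)) 0 with
        | none => f :: (P' ++ 0 :: M :: S)
        | some (pop_num, a2) => _) = _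
      rw [PySem.List.pop?_zero_cons]
      simp only [PySem.List.insert_zero, PySem.List.pySetD_natCast]
      have hset1 : (M :: (P' ++ 0 :: M :: S)).set (f :: P').length f
          = (M :: P') ++ f :: M :: S := by
        have : M :: (P' ++ 0 :: M :: S) = (M :: P') ++ 0 :: M :: S := by simp
        rw [this, show (f :: P').length = (M :: P').length by simp, set_len_append]
      rw [hset1]
      rw [show ((((f :: P').length : Nat) : Int) + 1) = (((f :: P').length + 1 : Nat) : Int)
        by push_cast; ring]
      rw [PySem.List.pop?_natCast _ ((f :: P').length + 1) (by simp)]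
      have herase : ((M :: P') ++ f :: M :: S).eraseIdx ((f :: P').length + 1)
          = (M :: P') ++ f :: S := by
        have h3 : (M :: P') ++ f :: M :: S = ((M :: P') ++ [f]) ++ M :: S := by simp
        rw [h3, show (f :: P').length + 1 = ((M :: P') ++ [f]).length by simp,
          eraseIdx_len_append]
        simp
      rw [herase]
      -- B's side
      have hsetB : ((f :: (P' ++ M :: S)).set 0 M).set (f :: P').length (f :: (P' ++ M :: S)).headI
          = (M :: P') ++ f :: S := by
        simp only [List.set_cons_zero, List.headI]
        have : M :: (P' ++ M :: S) = (M :: P') ++ M :: S := by simp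
        rw [this, show (f :: P').length = (M :: P').length by simp, set_len_append]
      simp only [List.cons_append] at hsetB ⊢
      rw [hsetB]
  · -- membership is preserved
    intro x
    cases P with
    | nil =>
      have hM0' : M = 0 := by
        by_cases hp : 0 < M
        · exact absurd rfl (hM hp)
        · omega
      subst hM0'
      simp
    | cons f P' =>
      have hsetB : ((f :: (P' ++ M :: S)).set 0 M).set (f :: P').length (f :: (P' ++ M :: S)).headI
          = (M :: P') ++ f :: S := by
        simp only [List.set_cons_zero, List.headI]
        have : M :: (P' ++ M :: S) = (M :: P') ++ M :: S := by simp
        rw [this, show (f :: P').length = (M :: P').length by simp, set_len_append]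
      simp only [List.cons_append] at hsetB ⊢
      rw [hsetB]
      simp [List.mem_append, List.mem_cons]
      tauto

lemma A_step (nums : List Int) (i exchange : Int) (fuel : Nat) (r : Nat)
    (h : i ≠ exchange)
    (hr : PySem.List.index? nums.reverse (mval nums) = some r) :
    shiftA (fuel + 1) nums i exchange
      = shiftA fuel ((nums.set 0 (mval nums)).set (nums.length - 1 - r) nums.headI)
          (i + 1) exchange := by
  have hfull := step_full nums (mval nums) r (mval_nonneg nums)
    (fun hp => (mval_pos_mem nums hp).2) hr
  have hlen : nums.length - 1 - r < nums.length := hfull.2.2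
  simp only [shiftA]
  rw [if_neg h, scan_eq, hr]
  simp only [Option.map_some]
  rw [if_pos ⟨by positivity, by exact_mod_cast hlen⟩, hfull.1]

lemma alt_step (nums : List Int) (i exchange : Int) (r : Nat)
    (h : i < exchange)
    (hr : PySem.List.index? nums.reverse (mval nums) = some r) :
    shift_nums_alt nums i exchange
      = shift_nums_alt ((nums.set 0 (mval nums)).set (nums.length - 1 - r) nums.headI)
          (i + 1) exchange := by
  rw [shift_nums_alt]
  rw [if_pos h]
  simp only [maxD_eq_mval, hr, Option.getD_some]

lemma main_good (n : Nat) : ∀ (nums : List Int) (i exchange : Int),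
    (exchange - i).toNat = n → Good nums →
    shiftA n nums i exchange = shift_nums_alt nums i exchange := by
  induction n with
  | zero =>
    intro nums i exchange h0 _
    rw [shift_nums_alt, if_neg (by omega : ¬ i < exchange)]
    rfl
  | succ n ih =>
    intro nums i exchange hn hg
    have hlt : i < exchange := by omega
    have hc := good_cond nums hg
    have hmem : mval nums ∈ nums.reverse := by simpa using cond_mem nums hc
    obtain ⟨r, hr⟩ := Option.isSome_iff_exists.mp
      ((PySem.List.index?_isSome_iff nums.reverse (mval nums)).mpr hmem)
    rw [A_step nums i exchange n r (by omega) hr, alt_step nums i exchange r hlt hr]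
    apply ih _ _ _ (by omega)
    have hmf := (step_full nums (mval nums) r (mval_nonneg nums)
      (fun hp => (mval_pos_mem nums hp).2) hr).2.1
    rcases hg with h0 | ⟨a, ha, b, hb, hpa, hpb, hab⟩
    · exact Or.inl ((hmf 0).mpr h0)
    · exact Or.inr ⟨a, (hmf a).mpr ha, b, (hmf b).mpr hb, hpa, hpb, hab⟩

lemma oneshot (nums : List Int) (i exchange : Int)
    (hx : exchange = i + 1) (hc : Cond nums) :
    shiftA 1 nums i exchange = shift_nums_alt nums i exchange := by
  have hmem : mval nums ∈ nums.reverse := by simpa using cond_mem nums hc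
  obtain ⟨r, hr⟩ := Option.isSome_iff_exists.mp
    ((PySem.List.index?_isSome_iff nums.reverse (mval nums)).mpr hmem)
  rw [A_step nums i exchange 0 r (by omega) hr,
    alt_step nums i exchange r (by omega) hr]
  rw [shift_nums_alt, if_neg (by omega : ¬ i + 1 < exchange)]
  rfl

-- ===== VERDICT (by name: the statement is the Claim_ definition above) =====
theorem shift_nums_spec : Claim_equal_shift_nums := by
  unfold Claim_equal_shift_nums
  intro nums i exchange _ hpre
  unfold Spec_shift_nums shift_nums
  rcases hpre with heq | ⟨hlt, hcase⟩
  · subst heq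
    rw [show (i - i).toNat = 0 by omega]
    rw [shift_nums_alt, if_neg (by omega : ¬ i < i)]
    rfl
  · rcases hcase with h0 | h2 | ⟨hp, hx⟩
    · exact main_good _ nums i exchange rfl (Or.inl h0)
    · exact main_good _ nums i exchange rfl (Or.inr h2)
    · rw [show (exchange - i).toNat = 1 by omega]
      exact oneshot nums i exchange hx (Or.inr hp)
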